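-- pv_equiv track=rewrite | github.com/simonhangarita12/dashboard | dashboard.py | fecha_ing
-- ===== SOURCE A (Python) =====
-- def fecha_ing(fecha):
--     spanish_months = {
--     'ene.': 'Jan', 'feb.': 'Feb', 'mar.': 'Mar', 'abr.': 'Apr',
--     'may.': 'May', 'jun.': 'Jun', 'jul.': 'Jul', 'ago.': 'Aug',
--     'sep.': 'Sep', 'oct.': 'Oct', 'nov.': 'Nov', 'dic.': 'Dec'
-- }
--     for spa in spanish_months:
--         if spa in fecha:
--           fecha = fecha.replace(spa, spanish_months[spa])
--         else:
--             pass
--     return fecha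
-- ===== SOURCE B (Python) =====
-- def fecha_ing(fecha):
--     spanish_months = {
--     'ene.': 'Jan', 'feb.': 'Feb', 'mar.': 'Mar', 'abr.': 'Apr',
--     'may.': 'May', 'jun.': 'Jun', 'jul.': 'Jul', 'ago.': 'Aug',
--     'sep.': 'Sep', 'oct.': 'Oct', 'nov.': 'Nov', 'dic.': 'Dec'
-- }
--     out = []
--     i = 0
--     n = len(fecha)
--     while i < n:
--         eng = spanish_months.get(fecha[i:i+4])
--         if eng is not None:
--             out.append(eng)
--             i += 4
--         else:
--             out.append(fecha[i])
--             i += 1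
--     return ''.join(out)
-- ===== Notes on version B (the rewrite author's own statement) =====
-- stated objective: alternative
-- what changed: Replaces A's twelve sequential full-string str.replace passes (which can re-feed earlier replacements into later ones) by a single left-to-right scan that looks up the 4-char window in the month dict and emits either the translation or the current character.
-- intended difference: On strings containing 'ene.ov.' or 'jun.ov.' A's earlier replacement (Jan/Jun) abuts the following 'ov.' and forms a fresh 'nov.' that the later pass double-translates (e.g. 'jun.ov.' -> 'JuNov'), while B translates each original occurrence exactly once ('Junov.'), which is the intended translation. — e.g. on fecha_ing("jun.ov."): A returns "JuNov", B returns "Junov."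
import Mathlib
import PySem

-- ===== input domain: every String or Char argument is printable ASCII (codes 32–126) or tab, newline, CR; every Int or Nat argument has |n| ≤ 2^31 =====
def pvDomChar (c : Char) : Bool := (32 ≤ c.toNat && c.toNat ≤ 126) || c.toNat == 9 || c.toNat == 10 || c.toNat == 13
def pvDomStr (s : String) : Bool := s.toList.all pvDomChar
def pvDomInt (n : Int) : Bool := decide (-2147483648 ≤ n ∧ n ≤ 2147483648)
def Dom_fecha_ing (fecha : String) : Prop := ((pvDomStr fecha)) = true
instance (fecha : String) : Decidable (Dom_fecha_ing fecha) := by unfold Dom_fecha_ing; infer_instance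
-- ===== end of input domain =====

-- B replaces A's twelve sequential full-string replace passes by one left-to-right scan (alternative
-- decomposition, same cost class); A = B except on the cascade inputs described at D_fecha_ing.

-- ===== PORT A =====
def fecha_ing (fecha : String) : String :=
  let spanish_months : PySem.Dict String String :=
    PySem.Dict.ofList
    [("ene.", "Jan"), ("feb.", "Feb"), ("mar.", "Mar"), ("abr.", "Apr"),
     ("may.", "May"), ("jun.", "Jun"), ("jul.", "Jul"), ("ago.", "Aug"),
     ("sep.", "Sep"), ("oct.", "Oct"), ("nov.", "Nov"), ("dic.", "Dec")]
  (PySem.Dict.keys spanish_months).foldl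
    (fun fecha spa =>
      if PySem.Str.isIn spa fecha then
        -- spanish_months[spa]: spa is one of the dict's own keys, so the lookup always succeeds
        PySem.Str.replace fecha spa ((PySem.Dict.get? spanish_months spa).getD "")
      else fecha)
    fecha

-- ===== PORT B =====
-- the month table of Source B, on code points
def pvTable : List (List Char × List Char) :=
  [(['e','n','e','.'], ['J','a','n']), (['f','e','b','.'], ['F','e','b']),
   (['m','a','r','.'], ['M','a','r']), (['a','b','r','.'], ['A','p','r']),
   (['m','a','y','.'], ['M','a','y']), (['j','u','n','.'], ['J','u','n']),
   (['j','u','l','.'], ['J','u','l']), (['a','g','o','.'], ['A','u','g']),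
   (['s','e','p','.'], ['S','e','p']), (['o','c','t','.'], ['O','c','t']),
   (['n','o','v','.'], ['N','o','v']), (['d','i','c','.'], ['D','e','c'])]

-- Source B's while loop: look up the 4-character window fecha[i:i+4]; emit the translation (advance 4) or the character (advance 1)
def scanW (tbl : List (List Char × List Char)) : List Char → List Char
  | [] => []
  | c :: t =>
    match tbl.find? (fun kv => (c :: t).take 4 == kv.1) with
    | some kv => kv.2 ++ scanW tbl (t.drop 3)
    | none => c :: scanW tbl t
termination_by s => s.length
decreasing_by
  all_goals simp [List.length_drop]

def fecha_ing_alt (fecha : String) : String :=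
  String.ofList (scanW pvTable fecha.toList)

-- ===== PRECONDITION & SPEC =====
-- On strings containing 'ene.ov.' or 'jun.ov.', A's earlier replacement ('Jan'/'Jun') abuts the following
-- 'ov.' and forms a fresh 'nov.' that A's later pass translates again (e.g. 'jun.ov.' -> 'JuNov'), while B
-- translates each original occurrence exactly once ('Junov.'), which is the intended translation.
def D_fecha_ing (fecha : String) : Prop :=
  PySem.Str.isIn "ene.ov." fecha = true ∨ PySem.Str.isIn "jun.ov." fecha = true
instance (fecha : String) : Decidable (D_fecha_ing fecha) := by unfold D_fecha_ing; infer_instance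

def Spec_fecha_ing (fecha : String) (out : String) : Prop :=
  ¬ D_fecha_ing fecha → out = fecha_ing_alt fecha
instance (fecha : String) (out : String) : Decidable (Spec_fecha_ing fecha out) := by
  unfold Spec_fecha_ing; infer_instance

def pvDiffWitness_fecha_ing : String := "jun.ov."
def pvDiffWitnessOut_fecha_ing : String × String := ("JuNov", "Junov.")

-- ===== CLAIM (what is proved, stated in full; the proofs are below) =====
def Claim_unchanged_fecha_ing : Prop :=
  ∀ (fecha : String), Dom_fecha_ing fecha → Spec_fecha_ing fecha (fecha_ing fecha)
def Claim_changed_fecha_ing : Prop :=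
  Dom_fecha_ing (pvDiffWitness_fecha_ing) ∧ D_fecha_ing (pvDiffWitness_fecha_ing) ∧
  fecha_ing (pvDiffWitness_fecha_ing) = pvDiffWitnessOut_fecha_ing.1 ∧
  fecha_ing_alt (pvDiffWitness_fecha_ing) = pvDiffWitnessOut_fecha_ing.2 ∧
  pvDiffWitnessOut_fecha_ing.1 ≠ pvDiffWitnessOut_fecha_ing.2
def Claim_exact_fecha_ing : Prop :=
  ∀ (fecha : String), Dom_fecha_ing fecha → D_fecha_ing fecha →
    fecha_ing fecha ≠ fecha_ing_alt fecha

-- ===== LEMMAS AND PROOFS =====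

-- A's dict as a plain list of (key, value) pairs of strings (proof-side view of A's loop)
def pvStrTable : List (String × String) :=
  [("ene.", "Jan"), ("feb.", "Feb"), ("mar.", "Mar"), ("abr.", "Apr"),
   ("may.", "May"), ("jun.", "Jun"), ("jul.", "Jul"), ("ago.", "Aug"),
   ("sep.", "Sep"), ("oct.", "Oct"), ("nov.", "Nov"), ("dic.", "Dec")]

-- one replace pass of A, as clean structural recursion on the subject string
def replF (old new : List Char) : List Char → List Char
  | [] => []
  | c :: t =>
    if old.isPrefixOf (c :: t) then new ++ replF old new (t.drop (old.length - 1))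
    else c :: replF old new t
termination_by s => s.length
decreasing_by
  all_goals simp [List.length_drop]

-- the "cascade" inputs, on code points
def badL (s : List Char) : Prop :=
  ['e','n','e','.','o','v','.'] <:+: s ∨ ['j','u','n','.','o','v','.'] <:+: s

def pvNov : List Char × List Char := (['n','o','v','.'], ['N','o','v'])

-- what A's chain of passes really computes: B's scan plus the double-translation cascade
-- (once 'nov.' has been processed, a 'Jan'/'Jun' emitted earlier in the same string followed
-- by 'ov.' has formed a fresh 'nov.' which the nov-pass translated again)
def scanC (tbl : List (List Char × List Char)) : List Char → List Char
  | [] => []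
  | c :: t =>
    match tbl.find? (fun kv => (c :: t).take 4 == kv.1) with
    | some kv =>
      if pvNov ∈ tbl ∧ kv.2.getLast? = some 'n' ∧ ['o','v','.'] <+: t.drop 3 then
        kv.2.dropLast ++ (['N','o','v'] ++ scanC tbl (t.drop 6))
      else kv.2 ++ scanC tbl (t.drop 3)
    | none => c :: scanC tbl t
termination_by s => s.length
decreasing_by
  all_goals simp [List.length_drop]

-- ---- unfolding equations ----
lemma replF_nil (old new : List Char) : replF old new [] = [] := by
  rw [replF.eq_def]

lemma replF_cons_pos {old : List Char} (new : List Char) {c : Char} {t : List Char}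
    (h : old.isPrefixOf (c :: t) = true) :
    replF old new (c :: t) = new ++ replF old new (t.drop (old.length - 1)) := by
  rw [replF.eq_def]; simp [h]

lemma replF_cons_neg {old : List Char} (new : List Char) {c : Char} {t : List Char}
    (h : ¬ old.isPrefixOf (c :: t) = true) :
    replF old new (c :: t) = c :: replF old new t := by
  rw [replF.eq_def]; simp [h]

lemma scanW_nilS (tbl : List (List Char × List Char)) : scanW tbl [] = [] := by
  rw [scanW.eq_def]

lemma scanW_cons_eq (tbl : List (List Char × List Char)) (c : Char) (t : List Char) :
    scanW tbl (c :: t)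
      = match tbl.find? (fun kv => (c :: t).take 4 == kv.1) with
        | some kv => kv.2 ++ scanW tbl (t.drop 3)
        | none => c :: scanW tbl t := by
  rw [scanW.eq_def]

lemma scanW_cons_some {tbl : List (List Char × List Char)} {c : Char} {t : List Char}
    {kv : List Char × List Char}
    (h : tbl.find? (fun kv => (c :: t).take 4 == kv.1) = some kv) :
    scanW tbl (c :: t) = kv.2 ++ scanW tbl (t.drop 3) := by
  rw [scanW_cons_eq, h]

lemma scanW_cons_none {tbl : List (List Char × List Char)} {c : Char} {t : List Char}
    (h : tbl.find? (fun kv => (c :: t).take 4 == kv.1) = none) :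
    scanW tbl (c :: t) = c :: scanW tbl t := by
  rw [scanW_cons_eq, h]

lemma scanC_nilS (tbl : List (List Char × List Char)) : scanC tbl [] = [] := by
  rw [scanC.eq_def]

lemma scanC_cons_eq (tbl : List (List Char × List Char)) (c : Char) (t : List Char) :
    scanC tbl (c :: t)
      = match tbl.find? (fun kv => (c :: t).take 4 == kv.1) with
        | some kv =>
          if pvNov ∈ tbl ∧ kv.2.getLast? = some 'n' ∧ ['o','v','.'] <+: t.drop 3 then
            kv.2.dropLast ++ (['N','o','v'] ++ scanC tbl (t.drop 6))
          else kv.2 ++ scanC tbl (t.drop 3)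
        | none => c :: scanC tbl t := by
  rw [scanC.eq_def]

lemma scanC_cons_casc {tbl : List (List Char × List Char)} {c : Char} {t : List Char}
    {kv : List Char × List Char}
    (h : tbl.find? (fun kv => (c :: t).take 4 == kv.1) = some kv)
    (hc : pvNov ∈ tbl ∧ kv.2.getLast? = some 'n' ∧ ['o','v','.'] <+: t.drop 3) :
    scanC tbl (c :: t) = kv.2.dropLast ++ (['N','o','v'] ++ scanC tbl (t.drop 6)) := by
  rw [scanC_cons_eq, h]; exact if_pos hc

lemma scanC_cons_some {tbl : List (List Char × List Char)} {c : Char} {t : List Char}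
    {kv : List Char × List Char}
    (h : tbl.find? (fun kv => (c :: t).take 4 == kv.1) = some kv)
    (hc : ¬ (pvNov ∈ tbl ∧ kv.2.getLast? = some 'n' ∧ ['o','v','.'] <+: t.drop 3)) :
    scanC tbl (c :: t) = kv.2 ++ scanC tbl (t.drop 3) := by
  rw [scanC_cons_eq, h]; exact if_neg hc

lemma scanC_cons_none {tbl : List (List Char × List Char)} {c : Char} {t : List Char}
    (h : tbl.find? (fun kv => (c :: t).take 4 == kv.1) = none) :
    scanC tbl (c :: t) = c :: scanC tbl t := by
  rw [scanC_cons_eq, h]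

lemma scanC_empty (s : List Char) : scanC [] s = s := by
  induction s with
  | nil => exact scanC_nilS []
  | cons c t ih => rw [scanC_cons_none (by simp), ih]

-- ---- PySem.Chars.replace agrees with replF ----
lemma go_eq (old new : List Char) (hold : old ≠ []) :
    ∀ fuel (l acc : List Char), l.length ≤ fuel →
      PySem.Chars.replace.go old new fuel l acc = acc.reverse ++ replF old new l := by
  intro fuel
  induction fuel with
  | zero =>
    intro l acc h
    have hl : l = [] := List.eq_nil_of_length_eq_zero (Nat.le_zero.mp h)
    subst hl
    show acc.reverse ++ [] = acc.reverse ++ replF old new []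
    rw [replF_nil]
  | succ n ih =>
    intro l acc h
    cases l with
    | nil =>
      show acc.reverse = acc.reverse ++ replF old new []
      rw [replF_nil, List.append_nil]
    | cons c t =>
      obtain ⟨o, old', rfl⟩ : ∃ o old', old = o :: old' := by
        cases old with
        | nil => exact absurd rfl hold
        | cons o old' => exact ⟨o, old', rfl⟩
      show (if (o :: old').isPrefixOf (c :: t) = true then
              PySem.Chars.replace.go (o :: old') new n (List.drop (o :: old').length (c :: t))
                (new.reverse ++ acc)
            else PySem.Chars.replace.go (o :: old') new n t (c :: acc)) = _
      by_cases hp : (o :: old').isPrefixOf (c :: t) = true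
      · rw [if_pos hp]
        rw [ih (List.drop (o :: old').length (c :: t)) (new.reverse ++ acc)
              (by simp [List.length_drop] at h ⊢; omega)]
        rw [replF_cons_pos new hp]
        have hdrop : List.drop (o :: old').length (c :: t) = t.drop ((o :: old').length - 1) := by
          simp [List.length_cons, List.drop_succ_cons]
        rw [hdrop, List.reverse_append, List.reverse_reverse, List.append_assoc]
      · rw [if_neg hp]
        rw [ih t (c :: acc) (by simp at h ⊢; omega)]
        rw [replF_cons_neg new hp]
        simp

lemma replace_eq_replF (old new s : List Char) (hold : old ≠ []) :
    PySem.Chars.replace s old new = replF old new s := by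
  rw [PySem.Chars.replace]
  rw [if_neg (by simp [List.isEmpty_iff, hold])]
  rw [go_eq old new hold s.length s [] (le_refl _)]
  simp

lemma replF_of_not_infix {old : List Char} (new : List Char) :
    ∀ {s : List Char}, ¬ old <:+: s → replF old new s = s := by
  intro s
  induction s with
  | nil => intro _; exact replF_nil old new
  | cons c t ih =>
    intro h
    rw [replF_cons_neg new (fun hp => h (List.IsPrefix.isInfix (List.isPrefixOf_iff_prefix.mp hp)))]
    rw [ih (fun hi => h (hi.trans (List.suffix_cons c t).isInfix))]

-- ---- decidable character facts about the table ----
lemma fact_key_len : ∀ kv ∈ pvTable, kv.1.length = 4 := by decide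
lemma fact_key_last : ∀ kv ∈ pvTable, kv.1[3]? = some '.' := by decide
lemma fact_key_low : ∀ kv ∈ pvTable, ∀ j, j < 3 →
    97 ≤ ((kv.1[j]?).getD ' ').toNat ∧ ((kv.1[j]?).getD ' ').toNat ≤ 122 := by decide
lemma fact_val_len : ∀ kv ∈ pvTable, kv.2.length = 3 := by decide
lemma fact_val_head : ∀ kv ∈ pvTable,
    65 ≤ ((kv.2[0]?).getD ' ').toNat ∧ ((kv.2[0]?).getD ' ').toNat ≤ 90 := by decide
lemma fact_no_mid : ∀ kv ∈ pvTable, ∀ kv' ∈ pvTable,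
    ¬ (kv.1[0]? = kv'.2[1]? ∧ kv.1[1]? = kv'.2[2]?) := by decide
lemma fact_end_nov : ∀ kv ∈ pvTable, ∀ kv' ∈ pvTable, kv.1[0]? = kv'.2[2]? →
    kv.1 = ['n','o','v','.'] ∧ kv'.2[2]? = some 'n' := by decide
lemma fact_pair_of_last_n : ∀ kv ∈ pvTable, kv.2.getLast? = some 'n' →
    kv = (['e','n','e','.'], ['J','a','n']) ∨ kv = (['j','u','n','.'], ['J','u','n']) := by decide
lemma fact_getLast_eq_two : ∀ kv ∈ pvTable, kv.2.getLast? = kv.2[2]? := by decide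
lemma fact_nov_mem : pvNov ∈ pvTable := by decide
lemma fact_key_unique : ∀ x ∈ pvTable, ∀ y ∈ pvTable, x.1 = y.1 → x = y := by decide
lemma fact_pos_nov : ∀ m, m < 12 →
    ((pvTable[m]?).getD pvNov).2.getLast? = some 'n' → pvNov ∉ pvTable.take (m + 1) := by decide
lemma fact_ov : ∀ kv ∈ pvTable, ¬ (kv.1[0]? = some 'o' ∧ kv.1[1]? = some 'v') := by decide
lemma fact_v : ∀ kv ∈ pvTable, kv.1[0]? ≠ some 'v' := by decide

lemma length_eq_four {α : Type} {l : List α} (h : l.length = 4) : ∃ a b c d, l = [a, b, c, d] := by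
  match l, h with
  | [a, b, c, d], _ => exact ⟨a, b, c, d, rfl⟩

lemma prefix_getElem? {α : Type} {p l : List α} (h : p <+: l) {i : ℕ} (hi : i < p.length) :
    l[i]? = p[i]? := by
  obtain ⟨r, rfl⟩ := h
  exact List.getElem?_append_left hi

-- ---- no key matches where a '.' sits in its letter positions ----
lemma predFalse {x : List Char × List Char} (hx : x ∈ pvTable) (X : List Char) {j : ℕ}
    (hj : j < 3) (hX : X[j]? = some '.') :
    ((X.take 4 == x.1) = false) := by
  rw [beq_eq_false_iff_ne]
  intro he
  have h1 : x.1[j]? = some '.' := by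
    rw [← he, List.getElem?_take, if_pos (by omega)]
    exact hX
  have h2 := (fact_key_low x hx j hj).1
  rw [h1] at h2
  simp at h2

lemma find?_dot_none {tb : List (List Char × List Char)} (htb : ∀ x ∈ tb, x ∈ pvTable)
    {X : List Char} {j : ℕ} (hj : j < 3) (hX : X[j]? = some '.') :
    tb.find? (fun kv => X.take 4 == kv.1) = none :=
  List.find?_eq_none.mpr (fun x hx => by
    show ¬ ((X.take 4 == x.1) = true)
    rw [predFalse (htb x hx) X hj hX]
    simp)

lemma badL_mono {u s : List Char} (h : u <:+: s) : badL u → badL s :=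
  Or.imp (fun h1 => h1.trans h) (fun h1 => h1.trans h)

-- ---- the scan is transparent to lowercase-…-dot patterns ----
lemma transC (pre : List (List Char × List Char)) (hpre : ∀ kv ∈ pre, kv ∈ pvTable) :
    ∀ (t p : List Char), p ≠ [] → p.length ≤ 3 →
      (∀ c ∈ p.dropLast, 97 ≤ c.toNat) → p.getLast? = some '.' →
      (p <+: scanC pre t ↔ p <+: t) := by
  intro t
  induction t with
  | nil =>
    intro p hne _ _ _
    rw [scanC_nilS]
  | cons c t' ih =>
    intro p hne hlen hlow hlast
    cases hF : pre.find? (fun kv => (c :: t').take 4 == kv.1) with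
    | some kv =>
      have hkv : kv ∈ pvTable := hpre kv (List.mem_of_find?_eq_some hF)
      have htake : (c :: t').take 4 = kv.1 := by
        have := List.find?_some hF; simpa using this
      apply iff_of_false
      · -- p cannot start at the uppercase head of the emitted block
        intro hp
        obtain ⟨U, a, b, hv⟩ := List.length_eq_three.mp (fact_val_len kv hkv)
        obtain ⟨q, p', rfl⟩ : ∃ q p', p = q :: p' := by
          cases p with
          | nil => exact absurd rfl hne
          | cons q p' => exact ⟨q, p', rfl⟩
        have hU := fact_val_head kv hkv
        rw [hv] at hU
        simp at hU
        have hqU : q = U := by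
          by_cases hcond : pvNov ∈ pre ∧ kv.2.getLast? = some 'n' ∧ ['o','v','.'] <+: t'.drop 3
          · rw [scanC_cons_casc hF hcond, hv] at hp
            rw [show (([U, a, b] : List Char).dropLast ++ (['N','o','v'] ++ scanC pre (t'.drop 6)))
                  = U :: (a :: ('N' :: 'o' :: 'v' :: scanC pre (t'.drop 6)))
                  from rfl] at hp
            exact (List.cons_prefix_cons.mp hp).1
          · rw [scanC_cons_some hF hcond, hv] at hp
            rw [show (([U, a, b] : List Char) ++ scanC pre (t'.drop 3))
                  = U :: (a :: (b :: scanC pre (t'.drop 3))) from rfl] at hp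
            exact (List.cons_prefix_cons.mp hp).1
        cases p' with
        | nil =>
          simp at hlast
          subst hlast
          rw [← hqU] at hU
          exact absurd hU (by decide)
        | cons b' p'' =>
          have hq : 97 ≤ q.toNat := hlow q (by simp)
          rw [hqU] at hq
          omega
      · -- p cannot start on the key text either: its '.' falls on a letter position of kv.1
        intro hp
        have hidx : p.length - 1 < p.length := by
          cases p with
          | nil => exact absurd rfl hne
          | cons q p' => simp
        have hdot : p[p.length - 1]? = some '.' := by
          rw [← List.getLast?_eq_getElem?]; exact hlast
        have h1 : (c :: t')[p.length - 1]? = some '.' := by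
          rw [prefix_getElem? hp hidx]; exact hdot
        have h2 : kv.1[p.length - 1]? = some '.' := by
          rw [← htake, List.getElem?_take, if_pos (by omega)]
          exact h1
        have h3 := (fact_key_low kv hkv (p.length - 1) (by omega)).1
        rw [h2] at h3
        simp at h3
    | none =>
      rw [scanC_cons_none hF]
      obtain ⟨q, p', rfl⟩ : ∃ q p', p = q :: p' := by
        cases p with
        | nil => exact absurd rfl hne
        | cons q p' => exact ⟨q, p', rfl⟩
      cases p' with
      | nil =>
        simp at hlast
        subst hlast
        rw [List.cons_prefix_cons, List.cons_prefix_cons]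
        simp
      | cons b' p'' =>
        rw [List.cons_prefix_cons, List.cons_prefix_cons]
        have hrec := ih (b' :: p'') (by simp) (by simp at hlen ⊢; omega)
          (by
            intro x hx
            exact hlow x (by
              rw [show (q :: b' :: p'').dropLast = q :: (b' :: p'').dropLast from rfl]
              exact List.mem_cons_of_mem q hx))
          (by rw [List.getLast?_cons_cons] at hlast; exact hlast)
        rw [hrec]

-- ---- a replace pass slides over an already-emitted translation ----
lemma pushL {kv kv' : List Char × List Char} (hkv : kv ∈ pvTable) (hkv' : kv' ∈ pvTable)
    (X : List Char)
    (hOV : kv.1 = ['n','o','v','.'] → kv'.2[2]? = some 'n' → ¬ (['o','v','.'] <+: X)) :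
    replF kv.1 kv.2 (kv'.2 ++ X) = kv'.2 ++ replF kv.1 kv.2 X := by
  obtain ⟨U, a, b, hv⟩ := List.length_eq_three.mp (fact_val_len kv' hkv')
  obtain ⟨k0, k1, k2, k3, hk⟩ := length_eq_four (fact_key_len kv hkv)
  have hUrange := fact_val_head kv' hkv'
  rw [hv] at hUrange
  simp at hUrange
  have hk0 := (fact_key_low kv hkv 0 (by omega)).1
  rw [hk] at hk0
  simp at hk0
  rw [hv]
  rw [show ([U, a, b] ++ X) = U :: (a :: (b :: X)) from rfl]
  rw [replF_cons_neg kv.2 (by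
    rw [hk]; intro hp
    have h1 := (List.cons_prefix_cons.mp (List.isPrefixOf_iff_prefix.mp hp)).1
    rw [h1] at hk0
    omega)]
  rw [replF_cons_neg kv.2 (by
    rw [hk]; intro hp
    have hpp := List.isPrefixOf_iff_prefix.mp hp
    have h1 : k0 = a := (List.cons_prefix_cons.mp hpp).1
    have h2 : k1 = b := (List.cons_prefix_cons.mp (List.cons_prefix_cons.mp hpp).2).1
    apply fact_no_mid kv hkv kv' hkv'
    rw [hk, hv]
    simp [h1, h2])]
  rw [replF_cons_neg kv.2 (by
    rw [hk]; intro hp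
    have hpp := List.isPrefixOf_iff_prefix.mp hp
    have h1 : k0 = b := (List.cons_prefix_cons.mp hpp).1
    have hnov := fact_end_nov kv hkv kv' hkv' (by rw [hk, hv]; simp [h1])
    have hkk := hk.symm.trans hnov.1
    simp at hkk
    have hovX : ['o','v','.'] <+: X := by
      have htl := (List.cons_prefix_cons.mp hpp).2
      rw [hkk.2.1, hkk.2.2.1, hkk.2.2.2] at htl
      exact htl
    exact hOV hnov.1 hnov.2 hovX)]
  rfl

-- ---- a replace pass slides over a cascade block 'J?Nov' as well ----
lemma pushCascade {kv : List Char × List Char} (hkv : kv ∈ pvTable) (u : Char)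
    (X : List Char) :
    replF kv.1 kv.2 ('J' :: u :: 'N' :: 'o' :: 'v' :: X)
      = 'J' :: u :: 'N' :: 'o' :: 'v' :: replF kv.1 kv.2 X := by
  obtain ⟨k0, k1, k2, k3, hk⟩ := length_eq_four (fact_key_len kv hkv)
  have hk0 := (fact_key_low kv hkv 0 (by omega)).1
  have hk1 := (fact_key_low kv hkv 1 (by omega)).1
  rw [hk] at hk0 hk1
  simp at hk0 hk1
  rw [replF_cons_neg kv.2 (by
    rw [hk]; intro hp
    have h1 := (List.cons_prefix_cons.mp (List.isPrefixOf_iff_prefix.mp hp)).1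
    rw [h1] at hk0; revert hk0; decide)]
  rw [replF_cons_neg kv.2 (by
    rw [hk]; intro hp
    have h2 := (List.cons_prefix_cons.mp (List.cons_prefix_cons.mp
      (List.isPrefixOf_iff_prefix.mp hp)).2).1
    rw [h2] at hk1; revert hk1; decide)]
  rw [replF_cons_neg kv.2 (by
    rw [hk]; intro hp
    have h1 := (List.cons_prefix_cons.mp (List.isPrefixOf_iff_prefix.mp hp)).1
    rw [h1] at hk0; revert hk0; decide)]
  rw [replF_cons_neg kv.2 (by
    rw [hk]; intro hp
    have hpp := List.isPrefixOf_iff_prefix.mp hp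
    have h1 : k0 = 'o' := (List.cons_prefix_cons.mp hpp).1
    have h2 : k1 = 'v' := (List.cons_prefix_cons.mp (List.cons_prefix_cons.mp hpp).2).1
    apply fact_ov kv hkv
    rw [hk]
    simp [h1, h2])]
  rw [replF_cons_neg kv.2 (by
    rw [hk]; intro hp
    have h1 := (List.cons_prefix_cons.mp (List.isPrefixOf_iff_prefix.mp hp)).1
    apply fact_v kv hkv
    rw [hk]
    simp [h1])]

-- ---- shifting an occurrence of a cascade pattern past a matched key ----
lemma infix_shift {pat s k : List Char} (htake : s.take 4 = k) (hk3 : k[3]? = some '.')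
    (h0 : pat[0]? ≠ some '.') (h1 : pat[1]? ≠ some '.') (h2 : pat[2]? ≠ some '.')
    (hplen : 4 ≤ pat.length) (hinf : pat <:+: s) :
    pat <+: s ∨ pat <:+: s.drop 4 := by
  obtain ⟨pre, suf, heq⟩ := hinf
  rw [List.append_assoc] at heq
  by_cases h4 : 4 ≤ pre.length
  · right
    refine ⟨pre.drop 4, suf, ?_⟩
    rw [← heq, List.drop_append_of_le_length h4, List.append_assoc]
  · by_cases hz : pre.length = 0
    · left
      have hpre : pre = [] := List.eq_nil_of_length_eq_zero hz
      subst hpre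
      simp at heq
      exact ⟨suf, heq⟩
    · exfalso
      have hs3 : s[3]? = some '.' := by
        rw [← htake] at hk3
        rw [List.getElem?_take, if_pos (by omega)] at hk3
        exact hk3
      have h3' : s[3]? = pat[3 - pre.length]? := by
        rw [← heq, List.getElem?_append_right (by omega), List.getElem?_append_left (by omega)]
      rw [hs3] at h3'
      have hcases : pre.length = 1 ∨ pre.length = 2 ∨ pre.length = 3 := by omega
      rcases hcases with hm | hm | hm <;> rw [hm] at h3'
      · exact h2 h3'.symm
      · exact h1 h3'.symm
      · exact h0 h3'.symm

-- ---- one stage: a replace pass absorbed into the scan over the processed prefix of the table ----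
set_option maxRecDepth 10000 in
lemma stageC (pre post : List (List Char × List Char)) (kv : List Char × List Char)
    (hsplit : pvTable = pre ++ kv :: post) :
    ∀ (n : ℕ) (s : List Char), s.length ≤ n →
      replF kv.1 kv.2 (scanC pre s) = scanC (pre ++ [kv]) s := by
  have hpre : ∀ x ∈ pre, x ∈ pvTable := fun x hx => by
    rw [hsplit]; exact List.mem_append_left _ hx
  have hkv : kv ∈ pvTable := by
    rw [hsplit]; exact List.mem_append_right _ (List.mem_cons_self ..)
  have hpre1 : ∀ x ∈ pre ++ [kv], x ∈ pvTable := by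
    intro x hx
    rcases List.mem_append.mp hx with h | h
    · exact hpre x h
    · simp at h; rw [h]; exact hkv
  have hm : pvTable[pre.length]? = some kv := by
    rw [hsplit, List.getElem?_append_right (le_refl _)]
    simp
  have hlen12 : pre.length < 12 := by
    have h12 : pvTable.length = 12 := by decide
    rw [hsplit] at h12
    simp at h12
    omega
  have htake1 : pvTable.take (pre.length + 1) = pre ++ [kv] := by
    rw [hsplit, List.take_append]
    simp
  have hnovkv : kv.2.getLast? = some 'n' → pvNov ∉ pre ++ [kv] := by
    intro hn
    have hfp := fact_pos_nov pre.length hlen12 (by rw [hm]; exact hn)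
    rw [htake1] at hfp
    exact hfp
  intro n
  induction n with
  | zero =>
    intro s hlen
    have hs : s = [] := List.eq_nil_of_length_eq_zero (Nat.le_zero.mp hlen)
    subst hs
    rw [scanC_nilS, scanC_nilS, replF_nil]
  | succ n ih =>
    intro s hlen
    cases s with
    | nil => rw [scanC_nilS, scanC_nilS, replF_nil]
    | cons c t =>
      have hlt : t.length ≤ n := by simp at hlen; omega
      have hld : (t.drop 3).length ≤ n := by simp [List.length_drop]; omega
      have hld6 : (t.drop 6).length ≤ n := by simp [List.length_drop]; omega
      cases hF : pre.find? (fun kv => (c :: t).take 4 == kv.1) with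
      | some kv' =>
        have hkv' : kv' ∈ pvTable := hpre kv' (List.mem_of_find?_eq_some hF)
        have htake : (c :: t).take 4 = kv'.1 := by
          have := List.find?_some hF; simpa using this
        have hF1 : (pre ++ [kv]).find? (fun kv => (c :: t).take 4 == kv.1) = some kv' := by
          rw [List.find?_append, hF]; rfl
        by_cases hn : kv'.2.getLast? = some 'n' ∧ ['o','v','.'] <+: t.drop 3
        · by_cases hnv : pvNov ∈ pre
          · -- cascade fires on both sides
            rw [scanC_cons_casc hF ⟨hnv, hn.1, hn.2⟩,
                scanC_cons_casc hF1 ⟨List.mem_append_left _ hnv, hn.1, hn.2⟩]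
            rcases fact_pair_of_last_n kv' hkv' hn.1 with rfl | rfl
            · rw [show ((['J','a','n'] : List Char).dropLast
                    ++ (['N','o','v'] ++ scanC pre (t.drop 6)))
                  = 'J' :: 'a' :: 'N' :: 'o' :: 'v' :: scanC pre (t.drop 6) from rfl]
              rw [pushCascade hkv 'a' (scanC pre (t.drop 6)), ih (t.drop 6) hld6]
              rfl
            · rw [show ((['J','u','n'] : List Char).dropLast
                    ++ (['N','o','v'] ++ scanC pre (t.drop 6)))
                  = 'J' :: 'u' :: 'N' :: 'o' :: 'v' :: scanC pre (t.drop 6) from rfl]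
              rw [pushCascade hkv 'u' (scanC pre (t.drop 6)), ih (t.drop 6) hld6]
              rfl
          · by_cases hnvk : kv = pvNov
            · -- the nov stage itself: the cascade appears on the right-hand side
              subst hnvk
              rw [scanC_cons_casc hF1
                    ⟨List.mem_append_right _ (List.mem_cons_self ..), hn.1, hn.2⟩,
                  scanC_cons_some hF (fun hc => hnv hc.1)]
              obtain ⟨r, hr⟩ := hn.2
              have hr6 : t.drop 6 = r := by
                have : t.drop 6 = (t.drop 3).drop 3 := by
                  rw [List.drop_drop]
                rw [this, ← hr]
                rfl
              have hsc : scanC pre (t.drop 3) = 'o' :: 'v' :: '.' :: scanC pre r := by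
                rw [← hr]
                rw [show (['o','v','.'] ++ r : List Char) = 'o' :: 'v' :: '.' :: r from rfl]
                rw [scanC_cons_none (find?_dot_none hpre (j := 2) (by omega) rfl)]
                rw [scanC_cons_none (find?_dot_none hpre (j := 1) (by omega) rfl)]
                rw [scanC_cons_none (find?_dot_none hpre (j := 0) (by omega) rfl)]
              rw [hsc, hr6]
              rcases fact_pair_of_last_n kv' hkv' hn.1 with rfl | rfl
              · rw [show ((['J','a','n'] : List Char)
                      ++ ('o' :: 'v' :: '.' :: scanC pre r))
                    = 'J' :: 'a' :: 'n' :: 'o' :: 'v' :: '.' :: scanC pre r from rfl]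
                rw [replF_cons_neg _ (by simp [pvNov, List.isPrefixOf]),
                    replF_cons_neg _ (by simp [pvNov, List.isPrefixOf]),
                    replF_cons_pos _ (by simp [pvNov, List.isPrefixOf])]
                rw [show (('o' :: 'v' :: '.' :: scanC pre r).drop (pvNov.1.length - 1))
                      = scanC pre r from rfl]
                rw [ih r (by rw [← hr6]; exact hld6)]
                rfl
              · rw [show ((['J','u','n'] : List Char)
                      ++ ('o' :: 'v' :: '.' :: scanC pre r))
                    = 'J' :: 'u' :: 'n' :: 'o' :: 'v' :: '.' :: scanC pre r from rfl]
                rw [replF_cons_neg _ (by simp [pvNov, List.isPrefixOf]),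
                    replF_cons_neg _ (by simp [pvNov, List.isPrefixOf]),
                    replF_cons_pos _ (by simp [pvNov, List.isPrefixOf])]
                rw [show (('o' :: 'v' :: '.' :: scanC pre r).drop (pvNov.1.length - 1))
                      = scanC pre r from rfl]
                rw [ih r (by rw [← hr6]; exact hld6)]
                rfl
            · -- a stage before nov: neither side cascades
              have hnv1 : pvNov ∉ pre ++ [kv] := by
                intro hmem
                rcases List.mem_append.mp hmem with h | h
                · exact hnv h
                · simp at h; exact hnvk h.symm
              rw [scanC_cons_some hF (fun hc => hnv hc.1),
                  scanC_cons_some hF1 (fun hc => hnv1 hc.1)]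
              rw [pushL hkv hkv' _ (fun hknov _ => by
                exfalso
                apply hnvk
                exact fact_key_unique kv hkv pvNov fact_nov_mem hknov)]
              rw [ih (t.drop 3) hld]
        · -- no cascade on either side
          rw [scanC_cons_some hF (fun hc => hn ⟨hc.2.1, hc.2.2⟩),
              scanC_cons_some hF1 (fun hc => hn ⟨hc.2.1, hc.2.2⟩)]
          rw [pushL hkv hkv' _ (fun _ h2n => by
            intro hovX
            apply hn
            have hn' : kv'.2.getLast? = some 'n' := by
              rw [fact_getLast_eq_two kv' hkv']; exact h2n
            refine ⟨hn', ?_⟩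
            exact (transC pre hpre (t.drop 3) ['o','v','.'] (by simp) (by simp)
              (by
                intro x hx
                rw [show (['o','v','.'] : List Char).dropLast = ['o','v'] from rfl] at hx
                rcases List.mem_cons.mp hx with h | h
                · rw [h]; decide
                · simp at h; rw [h]; decide)
              rfl).mp hovX)]
          rw [ih (t.drop 3) hld]
      | none =>
        obtain ⟨k0, k1, k2, k3, hk⟩ := length_eq_four (fact_key_len kv hkv)
        have hk3 : k3 = '.' := by
          have h := fact_key_last kv hkv
          rw [hk] at h
          simpa using h
        subst hk3
        by_cases hB : ((c :: t).take 4 == kv.1) = true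
        · -- the current stage's key matches here
          have htake : (c :: t).take 4 = kv.1 := by simpa using hB
          have hdecomp : c :: t = k0 :: k1 :: k2 :: '.' :: t.drop 3 := by
            conv_lhs => rw [← List.take_append_drop 4 (c :: t)]
            rw [htake, hk]
            rfl
          have hc : c = k0 := by injection hdecomp
          have ht : t = k1 :: k2 :: '.' :: t.drop 3 := by injection hdecomp with _ h2
          have hscan : scanC pre (c :: t) = c :: k1 :: k2 :: '.' :: scanC pre (t.drop 3) := by
            rw [scanC_cons_none hF]
            conv_lhs => rw [ht]
            rw [scanC_cons_none (find?_dot_none hpre (j := 2) (by omega) rfl)]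
            rw [scanC_cons_none (find?_dot_none hpre (j := 1) (by omega) rfl)]
            rw [scanC_cons_none (find?_dot_none hpre (j := 0) (by omega) rfl)]
          have hF2 : (pre ++ [kv]).find? (fun x => (c :: t).take 4 == x.1) = some kv := by
            rw [List.find?_append, hF, Option.none_or]
            exact List.find?_cons_of_pos hB
          rw [scanC_cons_some hF2 (fun hc2 => (hnovkv hc2.2.1) hc2.1), hscan, hc]
          rw [replF_cons_pos kv.2 (by rw [hk]; simp [List.isPrefixOf])]
          rw [fact_key_len kv hkv]
          rw [show (k1 :: k2 :: '.' :: scanC pre (t.drop 3)).drop (4 - 1) = scanC pre (t.drop 3)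
                from rfl]
          rw [ih (t.drop 3) hld]
        · -- no key matches at this position at all
          have hone : List.find? (fun x : List Char × List Char => (c :: t).take 4 == x.1) [kv]
              = none := by
            rw [List.find?_cons_of_neg (p := fun x : List Char × List Char => (c :: t).take 4 == x.1)
              (a := kv) (l := []) hB, List.find?_nil]
          have hF2 : (pre ++ [kv]).find? (fun x => (c :: t).take 4 == x.1) = none := by
            rw [List.find?_append, hF, Option.none_or]
            exact hone
          rw [scanC_cons_none hF, scanC_cons_none hF2]
          have hl1 := (fact_key_low kv hkv 1 (by omega)).1
          have hl2 := (fact_key_low kv hkv 2 (by omega)).1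
          rw [hk] at hl1 hl2
          simp at hl1 hl2
          have hnp : ¬ kv.1.isPrefixOf (c :: scanC pre t) = true := by
            intro hp
            have hpp := List.isPrefixOf_iff_prefix.mp hp
            rw [hk] at hpp
            have hc0 : k0 = c := (List.cons_prefix_cons.mp hpp).1
            subst hc0
            have htail : [k1, k2, '.'] <+: scanC pre t := (List.cons_prefix_cons.mp hpp).2
            rw [transC pre hpre t [k1, k2, '.'] (by simp) (by simp)
              (by
                intro x hx
                rw [show ([k1, k2, '.'] : List Char).dropLast = [k1, k2] from rfl] at hx
                rcases List.mem_cons.mp hx with h | h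
                · rw [h]; exact hl1
                · simp at h; rw [h]; exact hl2)
              rfl] at htail
            obtain ⟨r, hr⟩ := htail
            apply hB
            simp only [beq_iff_eq]
            rw [hk, ← hr]
            rfl
          rw [replF_cons_neg kv.2 hnp, ih t hlt]

-- ---- the chain of all twelve passes is the cascade-aware scan, on every input ----
lemma chainC : ∀ (post pre : List (List Char × List Char)), pvTable = pre ++ post →
    ∀ s : List Char,
      List.foldl (fun l kv => replF kv.1 kv.2 l) (scanC pre s) post = scanC pvTable s := by
  intro post
  induction post with
  | nil =>
    intro pre h s
    rw [List.foldl_nil, h, List.append_nil]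
  | cons kv post' ih =>
    intro pre h s
    rw [List.foldl_cons]
    rw [stageC pre post' kv h s.length s (le_refl _)]
    exact ih (pre ++ [kv]) (by rw [h]; simp) s

lemma mainC (s : List Char) :
    List.foldl (fun l kv => replF kv.1 kv.2 l) s pvTable = scanC pvTable s := by
  have h := chainC pvTable [] rfl s
  rw [scanC_empty] at h
  exact h

-- ---- off the cascade inputs, the cascade-aware scan IS B's scan ----
lemma scanC_eq_scanW : ∀ (n : ℕ) (s : List Char), s.length ≤ n → ¬ badL s →
    scanC pvTable s = scanW pvTable s := by
  intro n
  induction n with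
  | zero =>
    intro s hlen _
    have hs : s = [] := List.eq_nil_of_length_eq_zero (Nat.le_zero.mp hlen)
    subst hs
    rw [scanC_nilS, scanW_nilS]
  | succ n ih =>
    intro s hlen hbad
    cases s with
    | nil => rw [scanC_nilS, scanW_nilS]
    | cons c t =>
      have hbt : ¬ badL t := fun h => hbad (badL_mono (List.suffix_cons c t).isInfix h)
      have hbd : ¬ badL (t.drop 3) := fun h =>
        hbad (badL_mono ((List.drop_suffix 3 t).isInfix.trans (List.suffix_cons c t).isInfix) h)
      have hlt : t.length ≤ n := by simp at hlen; omega
      have hld : (t.drop 3).length ≤ n := by simp [List.length_drop]; omega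
      cases hF : pvTable.find? (fun kv => (c :: t).take 4 == kv.1) with
      | some kv =>
        have hkv : kv ∈ pvTable := List.mem_of_find?_eq_some hF
        have htake : (c :: t).take 4 = kv.1 := by
          have := List.find?_some hF; simpa using this
        have hdecomp : c :: t = kv.1 ++ t.drop 3 := by
          conv_lhs => rw [← List.take_append_drop 4 (c :: t)]
          rw [htake]
          rfl
        have hcf : ¬ (pvNov ∈ pvTable ∧ kv.2.getLast? = some 'n' ∧ ['o','v','.'] <+: t.drop 3) := by
          rintro ⟨-, hn2, hov⟩
          obtain ⟨r, hr⟩ := hov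
          rcases fact_pair_of_last_n kv hkv hn2 with rfl | rfl
          · exact hbad (Or.inl ⟨[], r, by rw [hdecomp, ← hr]; rfl⟩)
          · exact hbad (Or.inr ⟨[], r, by rw [hdecomp, ← hr]; rfl⟩)
        rw [scanC_cons_some hF hcf, scanW_cons_some hF, ih (t.drop 3) hld hbd]
      | none =>
        rw [scanC_cons_none hF, scanW_cons_none hF, ih t hlt hbt]

-- ---- at a cascade point the two scans produce different strings ----
lemma neqCasc {kv : List Char × List Char} (hkv : kv ∈ pvTable) {c : Char} {t r : List Char}
    (hF : pvTable.find? (fun x => (c :: t).take 4 == x.1) = some kv)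
    (hn : kv.2.getLast? = some 'n') (hr : ['o','v','.'] ++ r = t.drop 3) :
    scanC pvTable (c :: t) ≠ scanW pvTable (c :: t) := by
  rw [scanC_cons_casc hF ⟨fact_nov_mem, hn, ⟨r, hr⟩⟩, scanW_cons_some hF]
  have hsw : scanW pvTable (t.drop 3) = 'o' :: 'v' :: '.' :: scanW pvTable r := by
    rw [← hr, show (['o','v','.'] ++ r : List Char) = 'o' :: 'v' :: '.' :: r from rfl]
    rw [scanW_cons_none (find?_dot_none (fun x hx => hx) (j := 2) (by omega) rfl)]
    rw [scanW_cons_none (find?_dot_none (fun x hx => hx) (j := 1) (by omega) rfl)]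
    rw [scanW_cons_none (find?_dot_none (fun x hx => hx) (j := 0) (by omega) rfl)]
  rw [hsw]
  rcases fact_pair_of_last_n kv hkv hn with rfl | rfl
  · intro heq
    simp at heq
  · intro heq
    simp at heq

-- ---- on every cascade input the two scans disagree ----
lemma neqL : ∀ (n : ℕ) (s : List Char), s.length ≤ n → badL s →
    scanC pvTable s ≠ scanW pvTable s := by
  intro n
  induction n with
  | zero =>
    intro s hlen hbad
    have hs : s = [] := List.eq_nil_of_length_eq_zero (Nat.le_zero.mp hlen)
    subst hs
    rcases hbad with h | h <;> (rw [List.infix_nil] at h; simp at h)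
  | succ n ih =>
    intro s hlen hbad
    cases s with
    | nil =>
      rcases hbad with h | h <;> (rw [List.infix_nil] at h; simp at h)
    | cons c t =>
      cases hF : pvTable.find? (fun x => (c :: t).take 4 == x.1) with
      | none =>
        rw [scanC_cons_none hF, scanW_cons_none hF]
        intro heq
        have htl : scanC pvTable t = scanW pvTable t := by injection heq
        have hbt : badL t := by
          rcases hbad with ⟨p1, p2, heq2⟩ | ⟨p1, p2, heq2⟩
          · cases p1 with
            | nil =>
              exfalso
              simp at heq2
              obtain ⟨hc1, ht1⟩ := heq2
              exact List.find?_eq_none.mp hF (['e','n','e','.'], ['J','a','n']) (by decide)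
                (by
                  show (((c :: t).take 4 == ['e','n','e','.']) = true)
                  rw [← hc1, ← ht1]
                  rfl)
            | cons a p1' =>
              left
              refine ⟨p1', p2, ?_⟩
              simp at heq2
              simpa using heq2.2
          · cases p1 with
            | nil =>
              exfalso
              simp at heq2
              obtain ⟨hc1, ht1⟩ := heq2
              exact List.find?_eq_none.mp hF (['j','u','n','.'], ['J','u','n']) (by decide)
                (by
                  show (((c :: t).take 4 == ['j','u','n','.']) = true)
                  rw [← hc1, ← ht1]
                  rfl)
            | cons a p1' =>
              right
              refine ⟨p1', p2, ?_⟩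
              simp at heq2
              simpa using heq2.2
        exact ih t (by simp at hlen; omega) hbt htl
      | some kv =>
        have hkv : kv ∈ pvTable := List.mem_of_find?_eq_some hF
        have htake : (c :: t).take 4 = kv.1 := by
          have := List.find?_some hF; simpa using this
        rcases hbad with hb | hb
        · rcases infix_shift htake (fact_key_last kv hkv) (by decide) (by decide) (by decide)
            (by decide) hb with hLeft | hRight
          · obtain ⟨r2, hr2⟩ := hLeft
            have hkey : kv = (['e','n','e','.'], ['J','a','n']) := by
              apply fact_key_unique kv hkv _ (by decide)
              rw [← htake, ← hr2, List.take_append_of_le_length (by decide)]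
              rfl
            subst hkey
            have hov : ['o','v','.'] ++ r2 = t.drop 3 := by
              rw [show t.drop 3 = (c :: t).drop 4 from rfl, ← hr2,
                List.drop_append_of_le_length (by decide)]
              rfl
            exact neqCasc hkv hF (by decide) hov
          · have hbd : badL (t.drop 3) :=
              Or.inl (by rw [show t.drop 3 = (c :: t).drop 4 from rfl]; exact hRight)
            by_cases hcond : pvNov ∈ pvTable ∧ kv.2.getLast? = some 'n' ∧
                ['o','v','.'] <+: t.drop 3
            · obtain ⟨r3, hr3⟩ := hcond.2.2
              exact neqCasc hkv hF hcond.2.1 hr3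
            · rw [scanC_cons_some hF hcond, scanW_cons_some hF]
              intro heq
              exact ih (t.drop 3) (by simp [List.length_drop] at hlen ⊢; omega) hbd
                (List.append_cancel_left heq)
        · rcases infix_shift htake (fact_key_last kv hkv) (by decide) (by decide) (by decide)
            (by decide) hb with hLeft | hRight
          · obtain ⟨r2, hr2⟩ := hLeft
            have hkey : kv = (['j','u','n','.'], ['J','u','n']) := by
              apply fact_key_unique kv hkv _ (by decide)
              rw [← htake, ← hr2, List.take_append_of_le_length (by decide)]
              rfl
            subst hkey
            have hov : ['o','v','.'] ++ r2 = t.drop 3 := by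
              rw [show t.drop 3 = (c :: t).drop 4 from rfl, ← hr2,
                List.drop_append_of_le_length (by decide)]
              rfl
            exact neqCasc hkv hF (by decide) hov
          · have hbd : badL (t.drop 3) :=
              Or.inr (by rw [show t.drop 3 = (c :: t).drop 4 from rfl]; exact hRight)
            by_cases hcond : pvNov ∈ pvTable ∧ kv.2.getLast? = some 'n' ∧
                ['o','v','.'] <+: t.drop 3
            · obtain ⟨r3, hr3⟩ := hcond.2.2
              exact neqCasc hkv hF hcond.2.1 hr3
            · rw [scanC_cons_some hF hcond, scanW_cons_some hF]
              intro heq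
              exact ih (t.drop 3) (by simp [List.length_drop] at hlen ⊢; omega) hbd
                (List.append_cancel_left heq)

-- ---- the A side, pushed down to code-point level ----
lemma stepStr (f spa eng : String) (h : spa.toList ≠ []) :
    (if PySem.Str.isIn spa f then PySem.Str.replace f spa eng else f).toList
      = replF spa.toList eng.toList f.toList := by
  by_cases hin : PySem.Str.isIn spa f = true
  · rw [if_pos hin, PySem.Str.toList_replace, replace_eq_replF _ _ _ h]
  · rw [if_neg hin]
    symm
    apply replF_of_not_infix
    intro hi
    exact hin ((PySem.Str.isIn_iff_infix _ _).mpr hi)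

set_option maxRecDepth 10000 in
lemma strTable_keys_ne : ∀ kv ∈ pvStrTable, kv.1.toList ≠ [] := by decide

lemma foldStr : ∀ (tbl : List (String × String)) (f : String), (∀ kv ∈ tbl, kv.1.toList ≠ []) →
    (tbl.foldl (fun f kv => if PySem.Str.isIn kv.1 f then PySem.Str.replace f kv.1 kv.2 else f)
        f).toList
      = List.foldl (fun l kv => replF kv.1 kv.2 l) f.toList
          (tbl.map (fun kv => (kv.1.toList, kv.2.toList))) := by
  intro tbl
  induction tbl with
  | nil => intro f _; simp
  | cons kv tbl' ih =>
    intro f hne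
    rw [List.map_cons, List.foldl_cons, List.foldl_cons]
    rw [← stepStr f kv.1 kv.2 (hne kv (List.mem_cons_self ..))]
    exact ih _ (fun x hx => hne x (List.mem_cons_of_mem _ hx))

set_option maxRecDepth 10000 in
lemma fecha_ing_eq (fecha : String) :
    fecha_ing fecha
      = pvStrTable.foldl
          (fun f kv => if PySem.Str.isIn kv.1 f then PySem.Str.replace f kv.1 kv.2 else f)
          fecha := rfl

set_option maxRecDepth 10000 in
lemma map_tbl : pvStrTable.map (fun kv => (kv.1.toList, kv.2.toList)) = pvTable := by decide

lemma fecha_ing_toList (fecha : String) :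
    (fecha_ing fecha).toList = scanC pvTable fecha.toList := by
  rw [fecha_ing_eq, foldStr pvStrTable fecha strTable_keys_ne, map_tbl, mainC]

lemma fecha_ing_alt_toList (fecha : String) :
    (fecha_ing_alt fecha).toList = scanW pvTable fecha.toList := by
  simp [fecha_ing_alt]

-- evaluation of B's scan at the difference witness (scanW is defined by well-founded
-- recursion, so it is evaluated here by its unfolding lemmas rather than by `decide`)
lemma scan_wit : scanW pvTable ['j','u','n','.','o','v','.'] = ['J','u','n','o','v','.'] := by
  rw [scanW_cons_some (show pvTable.find?
        (fun kv => (['j','u','n','.','o','v','.'] : List Char).take 4 == kv.1)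
        = some (['j','u','n','.'], ['J','u','n']) from rfl)]
  rw [show List.drop 3 (['u','n','.','o','v','.'] : List Char) = ['o','v','.'] from rfl]
  rw [scanW_cons_none (show pvTable.find?
        (fun kv => (['o','v','.'] : List Char).take 4 == kv.1) = none from rfl)]
  rw [scanW_cons_none (show pvTable.find?
        (fun kv => (['v','.'] : List Char).take 4 == kv.1) = none from rfl)]
  rw [scanW_cons_none (show pvTable.find?
        (fun kv => (['.'] : List Char).take 4 == kv.1) = none from rfl)]
  rw [scanW_nilS]
  rfl

-- ===== VERDICT (by name: the statements are the Claim_ definitions above) =====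
theorem fecha_ing_spec : Claim_unchanged_fecha_ing := by
  intro fecha _ hD
  have hbad : ¬ badL fecha.toList := by
    intro hb
    apply hD
    unfold D_fecha_ing
    rcases hb with h | h
    · exact Or.inl ((PySem.Str.isIn_iff_infix _ _).mpr h)
    · exact Or.inr ((PySem.Str.isIn_iff_infix _ _).mpr h)
  apply String.toList_inj.mp
  rw [fecha_ing_toList, fecha_ing_alt_toList,
    scanC_eq_scanW fecha.toList.length fecha.toList (le_refl _) hbad]

set_option maxRecDepth 100000 in
set_option maxHeartbeats 1000000 in
theorem fecha_ing_changed : Claim_changed_fecha_ing := by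
  unfold Claim_changed_fecha_ing
  refine ⟨by decide, by decide, by decide, ?_, by decide⟩
  show String.ofList (scanW pvTable (String.toList "jun.ov.")) = "Junov."
  rw [show String.toList "jun.ov." = ['j','u','n','.','o','v','.'] from rfl, scan_wit]

theorem fecha_ing_tight : Claim_exact_fecha_ing := by
  intro fecha _ hD heq
  have hbad : badL fecha.toList := by
    unfold D_fecha_ing at hD
    rcases hD with h | h
    · exact Or.inl ((PySem.Str.isIn_iff_infix _ _).mp h)
    · exact Or.inr ((PySem.Str.isIn_iff_infix _ _).mp h)
  apply neqL fecha.toList.length fecha.toList (le_refl _) hbad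
  rw [← fecha_ing_toList, ← fecha_ing_alt_toList, heq]
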